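-- pv_equiv track=rewrite | github.com/ecraftgame16/comprog | code_challenges_march/positive_only.py | positive_only
-- ===== SOURCE A (Python) =====
-- def positive_only(numbers):
--     qualifying_num = []
--     total = 0
--     for num in numbers:
--         if num >= 0:
--             qualifying_num.append(num)
--     for num in qualifying_num:
--         total += num
--     return total // len(qualifying_num)
-- ===== SOURCE B (Python) =====
-- def positive_only(numbers):
--     total = 0
--     count = 0
--     for num in numbers:
--         if num >= 0:
--             total += num
--             count += 1
--     return total // count
-- ===== Notes on version B (the rewrite author's own statement) =====
-- stated objective: simpler
-- what changed: Replaces A's build-a-qualifying-list-then-sum-it two-loop structure with a single pass maintaining two scalar accumulators (running total and count); no intermediate list exists.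
import Mathlib
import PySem

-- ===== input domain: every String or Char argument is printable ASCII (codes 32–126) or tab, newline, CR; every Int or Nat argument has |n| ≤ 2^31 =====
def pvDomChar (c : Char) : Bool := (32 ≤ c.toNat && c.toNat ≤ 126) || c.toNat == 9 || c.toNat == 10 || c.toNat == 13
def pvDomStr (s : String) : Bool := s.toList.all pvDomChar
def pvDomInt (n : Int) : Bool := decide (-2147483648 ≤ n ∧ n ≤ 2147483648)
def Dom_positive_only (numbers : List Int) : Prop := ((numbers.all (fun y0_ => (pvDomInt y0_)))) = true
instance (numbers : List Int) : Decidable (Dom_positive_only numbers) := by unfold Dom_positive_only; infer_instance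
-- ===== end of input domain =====

-- B keeps two scalar accumulators in one pass instead of A's build-list-then-sum; return value only.

-- ===== PORT A =====
def positive_only (numbers : List Int) : Int :=
  let qualifying_num := numbers.foldl (fun acc num => if 0 ≤ num then acc ++ [num] else acc) []
  let total := qualifying_num.foldl (fun t num => t + num) 0
  PySem.Int.floordiv total qualifying_num.length

-- ===== PORT B =====
def positive_only_alt (numbers : List Int) : Int :=
  let tc := numbers.foldl
    (fun (p : Int × Int) num => if 0 ≤ num then (p.1 + num, p.2 + 1) else p) (0, 0)
  PySem.Int.floordiv tc.1 tc.2

-- ===== PRECONDITION & SPEC =====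
-- Pre_ excludes exactly the inputs with no non-negative element, on which A raises
-- ZeroDivisionError (B raises there too).
def Pre_positive_only (numbers : List Int) : Prop := ∃ n ∈ numbers, 0 ≤ n
instance (numbers : List Int) : Decidable (Pre_positive_only numbers) := by unfold Pre_positive_only; infer_instance
def pvWitness_positive_only : List Int := [3, -1, 4]

def Spec_positive_only (numbers : List Int) (out : Int) : Prop := out = positive_only_alt numbers
instance (numbers : List Int) (out : Int) : Decidable (Spec_positive_only numbers out) := by unfold Spec_positive_only; infer_instance

-- ===== CLAIM (what is proved, stated in full; the proofs are below) =====
def Claim_equal_positive_only : Prop := ∀ (numbers : List Int), Dom_positive_only numbers → Pre_positive_only numbers → Spec_positive_only numbers (positive_only numbers)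

-- ===== LEMMAS AND PROOFS =====

theorem pv_listA (numbers : List Int) (acc : List Int) :
    numbers.foldl (fun acc num => if 0 ≤ num then acc ++ [num] else acc) acc
      = acc ++ numbers.filter (fun n => decide (0 ≤ n)) := by
  induction numbers generalizing acc with
  | nil => simp
  | cons x xs ih =>
    by_cases h : (0:Int) ≤ x <;> simp [List.foldl, h, ih, List.filter]

theorem pv_sumA (l : List Int) (t : Int) :
    l.foldl (fun t num => t + num) t = t + l.sum := by
  induction l generalizing t with
  | nil => simp
  | cons x xs ih => simp [List.foldl, ih]; ring

theorem pv_pairB (numbers : List Int) (t c : Int) :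
    numbers.foldl (fun (p : Int × Int) num => if 0 ≤ num then (p.1 + num, p.2 + 1) else p) (t, c)
      = (t + (numbers.filter (fun n => decide (0 ≤ n))).sum,
         c + (numbers.filter (fun n => decide (0 ≤ n))).length) := by
  induction numbers generalizing t c with
  | nil => simp
  | cons x xs ih =>
    by_cases h : (0:Int) ≤ x <;> simp [List.foldl, h, ih, List.filter] <;> constructor <;> ring

-- ===== VERDICT (by name: the statement is the Claim_ definition above) =====
theorem positive_only_spec : Claim_equal_positive_only := by
  intro numbers _ _
  unfold Spec_positive_only positive_only positive_only_alt
  simp only [pv_listA, pv_sumA, pv_pairB, List.nil_append, zero_add]
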